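-- pv_equiv track=rewrite | github.com/theabbie/leetcode | even-odd-tree.py | isEvenAndDecreasing
-- ===== SOURCE A (Python) =====
-- def isEvenAndDecreasing(arr):
--     n = len(arr)
--     for i in range(n - 1):
--         if arr[i] <= arr[i + 1] or arr[i] % 2 == 1:
--             return False
--     if arr[-1] % 2 == 1:
--         return False
--     return True
-- ===== SOURCE B (Python) =====
-- def isEvenAndDecreasing(arr):
--     return all(x % 2 == 0 for x in arr) and all(a > b for a, b in zip(arr, arr[1:]))
-- ===== Notes on version B (the rewrite author's own statement) =====
-- stated objective: simpler
-- what changed: A's single fused index loop over adjacent pairs plus a separate final-element parity check is replaced by the conjunction of two independent whole-list property scans (all-even, and pairwise strict descent over zip(arr, arr[1:])).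
-- outside the precondition, e.g. on isEvenAndDecreasing([]): A raises IndexError, B returns True
-- crash fix: On the empty list A raises IndexError at its final-element access; B returns True (vacuously even and decreasing). — e.g. on isEvenAndDecreasing([]): A raises IndexError, B returns true
import Mathlib
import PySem

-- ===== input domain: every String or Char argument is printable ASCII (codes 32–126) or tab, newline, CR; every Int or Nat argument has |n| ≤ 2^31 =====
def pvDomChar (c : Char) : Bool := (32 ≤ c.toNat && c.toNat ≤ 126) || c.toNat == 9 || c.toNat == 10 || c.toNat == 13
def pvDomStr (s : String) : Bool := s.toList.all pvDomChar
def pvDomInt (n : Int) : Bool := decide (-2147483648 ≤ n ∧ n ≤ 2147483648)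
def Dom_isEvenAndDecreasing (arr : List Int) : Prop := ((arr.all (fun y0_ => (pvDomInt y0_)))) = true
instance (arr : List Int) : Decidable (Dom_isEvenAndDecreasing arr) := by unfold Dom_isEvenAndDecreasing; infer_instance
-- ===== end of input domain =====

-- B replaces A's fused adjacent-pair index loop with two independent whole-list scans (all even; pairwise strict descent): simpler decomposition, same cost.


-- ===== PORT A =====
-- for i in range(n-1): early-return loop, carried as (current index i, remaining iterations)
def pvALoop (arr : List Int) (i : Nat) : Nat → Bool
  | 0 =>
      -- if arr[-1] % 2 == 1: return False / return True
      if PySem.Int.mod (PySem.List.pyGetD arr (-1) 0) 2 == 1 then false else true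
  | rem + 1 =>
      if PySem.List.pyGetD arr (i : Int) 0 ≤ PySem.List.pyGetD arr ((i : Int) + 1) 0
          || PySem.Int.mod (PySem.List.pyGetD arr (i : Int) 0) 2 == 1 then false
      else pvALoop arr (i + 1) rem

def isEvenAndDecreasing (arr : List Int) : Bool :=
  pvALoop arr 0 (arr.length - 1)

-- ===== PORT B =====
def isEvenAndDecreasing_alt (arr : List Int) : Bool :=
  arr.all (fun x => PySem.Int.mod x 2 == 0)
    && (arr.zip (PySem.List.slice arr (some 1) none)).all (fun p => decide (p.2 < p.1))

-- ===== PRECONDITION & SPEC =====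
-- Pre_ excludes only the empty list, on which A raises IndexError at its final-element access.
def Pre_isEvenAndDecreasing (arr : List Int) : Prop := arr ≠ []
instance (arr : List Int) : Decidable (Pre_isEvenAndDecreasing arr) := by unfold Pre_isEvenAndDecreasing; infer_instance
def pvWitness_isEvenAndDecreasing : List Int := [4, 2]

-- On the empty list A raises IndexError at its final-element access; B returns True (vacuously even and decreasing).
def Raises_isEvenAndDecreasing (arr : List Int) : Prop := arr = []
instance (arr : List Int) : Decidable (Raises_isEvenAndDecreasing arr) := by unfold Raises_isEvenAndDecreasing; infer_instance
def pvRaiseWitness_isEvenAndDecreasing : List Int := []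
def pvRaiseWitnessOut_isEvenAndDecreasing : Bool := true

def Spec_isEvenAndDecreasing (arr : List Int) (out : Bool) : Prop := out = isEvenAndDecreasing_alt arr
instance (arr : List Int) (out : Bool) : Decidable (Spec_isEvenAndDecreasing arr out) := by unfold Spec_isEvenAndDecreasing; infer_instance

-- ===== CLAIM =====
def Claim_equal_isEvenAndDecreasing : Prop := ∀ (arr : List Int), Dom_isEvenAndDecreasing arr → Pre_isEvenAndDecreasing arr → Spec_isEvenAndDecreasing arr (isEvenAndDecreasing arr)
def Claim_raises_isEvenAndDecreasing : Prop := (∀ (arr : List Int), Dom_isEvenAndDecreasing arr → Raises_isEvenAndDecreasing arr → ¬ Pre_isEvenAndDecreasing arr) ∧ (Dom_isEvenAndDecreasing (pvRaiseWitness_isEvenAndDecreasing) ∧ Raises_isEvenAndDecreasing (pvRaiseWitness_isEvenAndDecreasing) ∧ isEvenAndDecreasing_alt (pvRaiseWitness_isEvenAndDecreasing) = pvRaiseWitnessOut_isEvenAndDecreasing)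

-- ===== LEMMAS AND PROOFS =====

-- Python's x % 2 ∈ {0,1}: "== 1" is the negation of "== 0".
theorem pv_mod2_ne (x : Int) : (PySem.Int.mod x 2 == 1) = !(PySem.Int.mod x 2 == 0) := by
  have h0 := PySem.Int.mod_nonneg x (b := 2) (by norm_num)
  have h1 := PySem.Int.mod_lt x (b := 2) (by norm_num)
  have h : PySem.Int.mod x 2 = 0 ∨ PySem.Int.mod x 2 = 1 := by omega
  rcases h with h | h <;> rw [h] <;> rfl

-- shifting the loop of A one element to the left
theorem pvALoop_shift (x : Int) (xs : List Int) (hxs : xs ≠ []) :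
    ∀ rem i, pvALoop (x :: xs) (i + 1) rem = pvALoop xs i rem := by
  intro rem
  induction rem with
  | zero =>
      intro i
      simp [pvALoop, PySem.List.pyGetD_neg_one (x :: xs) 0 (by simp),
            PySem.List.pyGetD_neg_one xs 0 hxs, List.getLast_cons hxs]
  | succ rem ih =>
      intro i
      have e2 : ((i + 1 : Nat) : Int) + 1 = ((i + 2 : Nat) : Int) := by push_cast; ring
      have e3 : ((i : Nat) : Int) + 1 = ((i + 1 : Nat) : Int) := by push_cast; ring
      simp only [pvALoop, e2, e3, PySem.List.pyGetD_natCast, List.getD_cons_succ, ih]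

-- one unfolding of B on a list with at least two elements
theorem pvAlt_step (x y : Int) (ys : List Int) :
    isEvenAndDecreasing_alt (x :: y :: ys)
      = (if x ≤ y || PySem.Int.mod x 2 == 1 then false
         else isEvenAndDecreasing_alt (y :: ys)) := by
  simp only [isEvenAndDecreasing_alt, PySem.List.slice_from_one, List.tail_cons,
    List.zip_cons_cons, List.all_cons, pv_mod2_ne]
  by_cases hxy : x ≤ y
  · simp [hxy, not_lt.mpr hxy]
  · have hx : ((x % 2 : Int) == 0) = !decide ((x % 2 : Int) = 1) := by
      have h : (x % 2 : Int) = 0 ∨ (x % 2 : Int) = 1 := by omega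
      rcases h with h | h <;> rw [h] <;> rfl
    simp [hxy, not_le.mp hxy, Bool.and_assoc, hx]

theorem pvA_eq_alt : ∀ (arr : List Int), arr ≠ [] →
    isEvenAndDecreasing arr = isEvenAndDecreasing_alt arr := by
  intro arr
  induction arr with
  | nil => intro h; exact absurd rfl h
  | cons x xs ih =>
      intro _
      cases xs with
      | nil =>
          simp only [isEvenAndDecreasing, isEvenAndDecreasing_alt, List.length_cons,
            List.length_nil, Nat.zero_add, Nat.sub_self, pvALoop,
            PySem.List.pyGetD_neg_one [x] 0 (by simp), List.getLast_singleton,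
            pv_mod2_ne, PySem.List.slice_from_one, List.tail_cons, List.zip_nil_right,
            List.all_nil, List.all_cons, Bool.and_true]
          cases h : (PySem.Int.mod x 2 == 0)
          · simp
          · simp [h]
      | cons y ys =>
          have hstep : isEvenAndDecreasing (x :: y :: ys)
              = (if x ≤ y || PySem.Int.mod x 2 == 1 then false
                 else isEvenAndDecreasing (y :: ys)) := by
            simp only [isEvenAndDecreasing, List.length_cons, Nat.add_sub_cancel, pvALoop]
            norm_num [PySem.List.pyGetD_zero_cons, PySem.List.pyGetD_ofNat',
              pvALoop_shift x (y :: ys) (by simp)]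
          rw [hstep, pvAlt_step x y ys]
          split_ifs with h
          · rfl
          · exact ih (by simp)

-- ===== VERDICT =====
theorem isEvenAndDecreasing_spec : Claim_equal_isEvenAndDecreasing := by
  intro arr _ hpre
  exact pvA_eq_alt arr hpre

@[simp]
theorem isEvenAndDecreasing_raises : Claim_raises_isEvenAndDecreasing := by
  unfold Claim_raises_isEvenAndDecreasing
  exact ⟨fun arr _ hr => by
    simp only [Raises_isEvenAndDecreasing] at hr
    simp [Pre_isEvenAndDecreasing, hr], by decide⟩
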